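-- pv_equiv track=rewrite | github.com/sabi-h/qpyr | qpyr/_lib/draw.py | get_dummy_format_information
-- ===== SOURCE A (Python) =====
-- from typing import Callable, Dict, List, Optional, Tuple
--
-- CoordinateValueMap = Dict[Tuple[int, int], int]
--
-- BLACK = 1
--
-- DUMMY_VALUE = -2
--
-- def get_dummy_format_information(grid_size) -> CoordinateValueMap:
--     result = {}
--     for col in range(grid_size):
--         if (col <= 7) or (col >= grid_size - 8):
--             result[(row := 8, col)] = DUMMY_VALUE
--
--     for row in range(grid_size):
--         if row <= 8 or row >= grid_size - 8:
--             result[(row, col := 8)] = DUMMY_VALUE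
--
--     result[(grid_size - 8, 8)] = BLACK
--     return result
-- ===== SOURCE B (Python) =====
-- BLACK = 1
--
-- DUMMY_VALUE = -2
--
-- def get_dummy_format_information(grid_size):
--     result = {}
--     for col in range(min(8, grid_size)):
--         result[(8, col)] = DUMMY_VALUE
--     for col in range(max(0, grid_size - 8), grid_size):
--         result[(8, col)] = DUMMY_VALUE
--     for row in range(min(9, grid_size)):
--         result[(row, 8)] = DUMMY_VALUE
--     for row in range(max(0, grid_size - 8), grid_size):
--         result[(row, 8)] = DUMMY_VALUE
--     result[(grid_size - 8, 8)] = BLACK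
--     return result
-- ===== Notes on version B (the rewrite author's own statement) =====
-- stated objective: faster
-- what changed: B builds the boundary cells directly from four clamped ranges (min/max arithmetic) instead of A's two full scans of range(grid_size) with a membership branch.
import Mathlib
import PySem

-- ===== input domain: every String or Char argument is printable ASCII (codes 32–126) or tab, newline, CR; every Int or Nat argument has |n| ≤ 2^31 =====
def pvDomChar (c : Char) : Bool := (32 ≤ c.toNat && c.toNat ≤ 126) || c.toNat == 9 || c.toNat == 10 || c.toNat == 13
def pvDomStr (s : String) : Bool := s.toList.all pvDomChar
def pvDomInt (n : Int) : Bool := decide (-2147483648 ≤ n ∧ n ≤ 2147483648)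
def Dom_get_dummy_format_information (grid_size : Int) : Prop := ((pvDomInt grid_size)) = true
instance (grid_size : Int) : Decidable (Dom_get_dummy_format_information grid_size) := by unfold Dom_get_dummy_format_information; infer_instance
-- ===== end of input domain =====

-- B replaces A's full-grid scans-with-branch by direct construction over the clamped boundary ranges (objective: faster, O(1)-sized loops vs O(n)).

-- ===== PORT A =====
def get_dummy_format_information (grid_size : Int) : List (Int × Int × Int) :=
  let d : PySem.Dict (Int × Int) Int :=
    (PySem.List.pyRange 0 grid_size 1).foldl
      (fun d col => if col ≤ 7 ∨ col ≥ grid_size - 8 then d.insert (8, col) (-2) else d)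
      PySem.Dict.empty
  let d :=
    (PySem.List.pyRange 0 grid_size 1).foldl
      (fun d row => if row ≤ 8 ∨ row ≥ grid_size - 8 then d.insert (row, 8) (-2) else d) d
  let d := d.insert (grid_size - 8, 8) 1
  d.items.map (fun p => (p.1.1, p.1.2, p.2))

-- ===== PORT B =====
def get_dummy_format_information_alt (grid_size : Int) : List (Int × Int × Int) :=
  let d : PySem.Dict (Int × Int) Int := PySem.Dict.empty
  let d := (PySem.List.pyRange 0 (min 8 grid_size) 1).foldl (fun d col => d.insert (8, col) (-2)) d
  let d := (PySem.List.pyRange (max 0 (grid_size - 8)) grid_size 1).foldl (fun d col => d.insert (8, col) (-2)) d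
  let d := (PySem.List.pyRange 0 (min 9 grid_size) 1).foldl (fun d row => d.insert (row, 8) (-2)) d
  let d := (PySem.List.pyRange (max 0 (grid_size - 8)) grid_size 1).foldl (fun d row => d.insert (row, 8) (-2)) d
  let d := d.insert (grid_size - 8, 8) 1
  d.items.map (fun p => (p.1.1, p.1.2, p.2))

-- ===== PRECONDITION & SPEC =====
def Spec_get_dummy_format_information (grid_size : Int) (out : List (Int × Int × Int)) : Prop := out = get_dummy_format_information_alt grid_size
instance (grid_size : Int) (out : List (Int × Int × Int)) : Decidable (Spec_get_dummy_format_information grid_size out) := by unfold Spec_get_dummy_format_information; infer_instance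

-- ===== CLAIM (what is proved, stated in full; the proofs are below) =====
def Claim_equal_get_dummy_format_information : Prop := ∀ (grid_size : Int), Dom_get_dummy_format_information grid_size → Spec_get_dummy_format_information grid_size (get_dummy_format_information grid_size)

-- ===== LEMMAS AND PROOFS =====

theorem foldl_id {α β : Type} (l : List β) (init : α) : l.foldl (fun a _ => a) init = init := by
  induction l generalizing init with
  | nil => rfl
  | cons x xs ih => simp only [List.foldl_cons]; exact ih init

theorem pv_loop1 (n : Int) (h : 16 < n) (d0 : PySem.Dict (Int × Int) Int) :
    (PySem.List.pyRange 0 n 1).foldl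
      (fun d col => if col ≤ 7 ∨ col ≥ n - 8 then d.insert (8, col) (-2) else d) d0
    = (PySem.List.pyRange (n - 8) n 1).foldl (fun d col => d.insert (8, col) (-2))
        ((PySem.List.pyRange 0 8 1).foldl (fun d col => d.insert (8, col) (-2)) d0) := by
  rw [PySem.List.pyRange_one_append 0 8 n (by omega) (by omega),
      PySem.List.pyRange_one_append 8 (n - 8) n (by omega) (by omega),
      ← List.append_assoc, List.foldl_append, List.foldl_append]
  rw [PySem.List.foldl_congr_mem (PySem.List.pyRange 0 8 1) _
        (fun (d : PySem.Dict (Int × Int) Int) (col : Int) => d.insert (8, col) (-2)) d0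
        (by intro acc x hx; rw [PySem.List.mem_pyRange_one] at hx
            simp [show x ≤ 7 by omega])]
  rw [PySem.List.foldl_congr_mem (PySem.List.pyRange 8 (n - 8) 1) _
        (fun (d : PySem.Dict (Int × Int) Int) (_ : Int) => d) _
        (by intro acc x hx; rw [PySem.List.mem_pyRange_one] at hx
            simp [show ¬ (x ≤ 7) by omega, show ¬ (x ≥ n - 8) by omega]),
      foldl_id]
  exact PySem.List.foldl_congr_mem _ _ _ _
    (by intro acc x hx; rw [PySem.List.mem_pyRange_one] at hx
        simp [show x ≥ n - 8 by omega])

theorem pv_loop2 (n : Int) (h : 16 < n) (d0 : PySem.Dict (Int × Int) Int) :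
    (PySem.List.pyRange 0 n 1).foldl
      (fun d row => if row ≤ 8 ∨ row ≥ n - 8 then d.insert (row, 8) (-2) else d) d0
    = (PySem.List.pyRange (n - 8) n 1).foldl (fun d row => d.insert (row, 8) (-2))
        ((PySem.List.pyRange 0 9 1).foldl (fun d row => d.insert (row, 8) (-2)) d0) := by
  rw [PySem.List.pyRange_one_append 0 9 n (by omega) (by omega),
      PySem.List.pyRange_one_append 9 (n - 8) n (by omega) (by omega),
      ← List.append_assoc, List.foldl_append, List.foldl_append]
  rw [PySem.List.foldl_congr_mem (PySem.List.pyRange 0 9 1) _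
        (fun (d : PySem.Dict (Int × Int) Int) (row : Int) => d.insert (row, 8) (-2)) d0
        (by intro acc x hx; rw [PySem.List.mem_pyRange_one] at hx
            simp [show x ≤ 8 by omega])]
  rw [PySem.List.foldl_congr_mem (PySem.List.pyRange 9 (n - 8) 1) _
        (fun (d : PySem.Dict (Int × Int) Int) (_ : Int) => d) _
        (by intro acc x hx; rw [PySem.List.mem_pyRange_one] at hx
            simp [show ¬ (x ≤ 8) by omega, show ¬ (x ≥ n - 8) by omega]),
      foldl_id]
  exact PySem.List.foldl_congr_mem _ _ _ _
    (by intro acc x hx; rw [PySem.List.mem_pyRange_one] at hx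
        simp [show x ≥ n - 8 by omega])

theorem pv_main (n : Int) : get_dummy_format_information n = get_dummy_format_information_alt n := by
  rcases (show n ≤ 0 ∨ 0 < n by omega) with h0 | h0
  · simp [get_dummy_format_information, get_dummy_format_information_alt,
      PySem.List.pyRange_one_eq_nil h0,
      PySem.List.pyRange_one_eq_nil (show (min 8 n) ≤ 0 by omega),
      PySem.List.pyRange_one_eq_nil (show (min 9 n) ≤ 0 by omega),
      PySem.List.pyRange_one_eq_nil (show n ≤ max 0 (n - 8) by omega)]
  · rcases (show n ≤ 16 ∨ 16 < n by omega) with h16 | h16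
    · interval_cases n <;> decide
    · have hmin8 : min 8 n = 8 := by omega
      have hmin9 : min 9 n = 9 := by omega
      have hmax : max 0 (n - 8) = n - 8 := by omega
      simp only [get_dummy_format_information, get_dummy_format_information_alt,
        hmin8, hmin9, hmax, pv_loop1 n h16, pv_loop2 n h16]

-- ===== VERDICT (by name: the statement is the Claim_ definition above) =====
theorem get_dummy_format_information_spec : Claim_equal_get_dummy_format_information := by
  intro n _
  exact pv_main n
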